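-- pv_equiv track=rewrite | github.com/julienLhermite/IAR-homework | Learning.py | get_possible_dirty_cells
-- ===== SOURCE A (Python) =====
-- import itertools, os
--
-- def get_possible_dirty_cells(grid_size, base_pos):
--     """
--     Etant donné une taille de grille et une position de la base dans la grille, retourne la liste de toutes les
--     combinaisons de cellules salles possible
--     :param grid_size: un tuple (x,y) représentant la taille de la grille
--     :param base_pos: [x, y] la position de la base
--     :return:
--     """
--     possible_grid_list = [list(i) for i in itertools.product([0, 1], repeat=grid_size[0] * grid_size[1]) if
--                           list(i)[base_pos[0] + base_pos[1] * grid_size[0]] == 0]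
--
--     possible_dirty_cells = list()
--     for possible in possible_grid_list:
--         l = list()
--         for index, case in enumerate(possible):
--             if case == 1:
--                 l.append([index % grid_size[0], index // grid_size[0]])
--         possible_dirty_cells.append(l)
--
--     return possible_dirty_cells
-- ===== SOURCE B (Python) =====
-- def get_possible_dirty_cells(grid_size, base_pos):
--     """Build the powerset of non-base cells directly (doubling loop) instead of
--     filtering all 2^N bit vectors."""
--     w = grid_size[0]
--     n = w * grid_size[1]
--     cells = list(range(n))
--     cells.pop(base_pos[0] + base_pos[1] * w)
--     subsets = [[]]
--     for i in reversed(cells):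
--         coord = [i % w, i // w]
--         subsets = subsets + [[coord] + s for s in subsets]
--     return subsets
-- ===== Notes on version B (the rewrite author's own statement) =====
-- stated objective: faster
-- what changed: B drops the generate-and-filter pass over all 2^N bit vectors and builds the powerset of the non-base cells directly with a doubling loop (popping the base cell from the index range first), emitting each combination once in the same lexicographic order.
import Mathlib
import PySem

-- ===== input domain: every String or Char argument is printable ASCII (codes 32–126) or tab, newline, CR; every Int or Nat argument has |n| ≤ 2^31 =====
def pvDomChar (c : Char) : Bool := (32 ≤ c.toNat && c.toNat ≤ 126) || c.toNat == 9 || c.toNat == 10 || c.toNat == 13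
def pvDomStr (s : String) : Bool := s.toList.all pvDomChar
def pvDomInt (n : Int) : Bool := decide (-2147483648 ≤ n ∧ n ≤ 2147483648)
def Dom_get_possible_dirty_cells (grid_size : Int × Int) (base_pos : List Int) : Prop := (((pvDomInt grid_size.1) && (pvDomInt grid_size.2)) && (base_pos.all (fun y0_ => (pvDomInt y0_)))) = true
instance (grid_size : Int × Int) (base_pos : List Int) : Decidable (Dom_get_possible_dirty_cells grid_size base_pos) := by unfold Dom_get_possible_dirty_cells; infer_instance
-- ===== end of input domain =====

-- B replaces A's generate-and-filter pass over all 2^N bit vectors by a direct powerset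
-- doubling loop over the non-base cells; return values agree on all of Pre_.

-- ===== PORT A =====
-- itertools.product([0, 1], repeat=n): all 0/1 vectors of length n in lexicographic order
def pvProdBits : Nat → List (List Int)
  | 0 => [[]]
  | n + 1 => (pvProdBits n).map (fun v => 0 :: v) ++ (pvProdBits n).map (fun v => 1 :: v)

def get_possible_dirty_cells (grid_size : Int × Int) (base_pos : List Int) : List (List (List Int)) :=
  let w := grid_size.1
  let n := w * grid_size.2
  let bi := (PySem.List.pyGet? base_pos 0).getD 0 + (PySem.List.pyGet? base_pos 1).getD 0 * w
  let possible_grid_list :=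
    (pvProdBits n.toNat).filter (fun v => (PySem.List.pyGet? v bi).getD 2 == 0)
  possible_grid_list.map (fun possible =>
    (PySem.List.enumerate possible).foldl
      (fun l p =>
        if p.2 == 1 then l ++ [[PySem.Int.mod p.1 w, PySem.Int.floordiv p.1 w]] else l) [])

-- ===== PORT B =====
def get_possible_dirty_cells_alt (grid_size : Int × Int) (base_pos : List Int) : List (List (List Int)) :=
  let w := grid_size.1
  let n := w * grid_size.2
  let cells := PySem.List.pyRange 0 n 1
  let bi := (PySem.List.pyGet? base_pos 0).getD 0 + (PySem.List.pyGet? base_pos 1).getD 0 * w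
  match PySem.List.pop? cells bi with
  | none => []  -- cells.pop raises IndexError here (outside Pre_)
  | some (_, rest) =>
    rest.reverse.foldl
      (fun subsets i =>
        subsets ++ subsets.map (fun s => [PySem.Int.mod i w, PySem.Int.floordiv i w] :: s))
      [[]]

-- ===== PRECONDITION & SPEC =====
-- Pre_ = exactly where Python A returns: base_pos has two coordinates and the flattened base
-- index is a valid Python index into the grid_size[0]*grid_size[1] bit vector (A raises
-- IndexError/ValueError otherwise; B's list.pop raises there too).
def Pre_get_possible_dirty_cells (grid_size : Int × Int) (base_pos : List Int) : Prop :=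
  2 ≤ base_pos.length ∧
  PySem.Raise.InRange (grid_size.1 * grid_size.2).toNat
    (base_pos.getD 0 0 + base_pos.getD 1 0 * grid_size.1)
instance (grid_size : Int × Int) (base_pos : List Int) : Decidable (Pre_get_possible_dirty_cells grid_size base_pos) := by unfold Pre_get_possible_dirty_cells; infer_instance

def pvWitness_get_possible_dirty_cells : (Int × Int) × List Int := ((2, 2), [0, 0])

def Spec_get_possible_dirty_cells (grid_size : Int × Int) (base_pos : List Int) (out : List (List (List Int))) : Prop := out = get_possible_dirty_cells_alt grid_size base_pos
instance (grid_size : Int × Int) (base_pos : List Int) (out : List (List (List Int))) : Decidable (Spec_get_possible_dirty_cells grid_size base_pos out) := by unfold Spec_get_possible_dirty_cells; infer_instance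

-- ===== CLAIM (what is proved, stated in full; the proofs are below) =====
def Claim_equal_get_possible_dirty_cells : Prop := ∀ (grid_size : Int × Int) (base_pos : List Int), Dom_get_possible_dirty_cells grid_size base_pos → Pre_get_possible_dirty_cells grid_size base_pos → Spec_get_possible_dirty_cells grid_size base_pos (get_possible_dirty_cells grid_size base_pos)

-- ===== LEMMAS AND PROOFS =====

-- powerset of a label list, 'absent before present', first label outermost
def pvPow {α : Type} : List α → List (List α)
  | [] => [[]]
  | l :: ls => pvPow ls ++ (pvPow ls).map (fun s => l :: s)

-- labels of the 1-bits of a vector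
def pvOnes {α : Type} : List α → List Int → List α
  | _, [] => []
  | [], _ :: _ => []
  | l :: ls, b :: v => (if b == 1 then [l] else []) ++ pvOnes ls v

theorem pvOnes_zero {α : Type} (l : α) (ls : List α) (v : List Int) :
    pvOnes (l :: ls) (0 :: v) = pvOnes ls v := by simp [pvOnes]

theorem pvOnes_one {α : Type} (l : α) (ls : List α) (v : List Int) :
    pvOnes (l :: ls) (1 :: v) = l :: pvOnes ls v := by simp [pvOnes]

theorem length_of_mem_pvProdBits : ∀ (n : Nat) (v : List Int), v ∈ pvProdBits n → v.length = n := by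
  intro n
  induction n with
  | zero => intro v hv; simp [pvProdBits] at hv; simp [hv]
  | succ m ih =>
    intro v hv
    simp only [pvProdBits, List.mem_append, List.mem_map] at hv
    rcases hv with ⟨w, hw, rfl⟩ | ⟨w, hw, rfl⟩ <;> simp [ih w hw]

theorem map_pvOnes_pvProdBits {α : Type} :
    ∀ (ls : List α), (pvProdBits ls.length).map (pvOnes ls) = pvPow ls := by
  intro ls
  induction ls with
  | nil => simp [pvProdBits, pvPow, pvOnes]
  | cons l ls ih =>
    simp only [List.length_cons, pvProdBits, List.map_append, List.map_map]
    have h0 : (pvOnes (l :: ls)) ∘ (fun v => (0 : Int) :: v) = pvOnes ls := by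
      funext v; simp [pvOnes_zero]
    have h1 : (pvOnes (l :: ls)) ∘ (fun v => (1 : Int) :: v) = fun v => l :: pvOnes ls v := by
      funext v; simp [pvOnes_one]
    rw [h0, h1, pvPow]
    have : (pvProdBits ls.length).map (fun v => l :: pvOnes ls v)
        = ((pvProdBits ls.length).map (pvOnes ls)).map (fun s => l :: s) := by
      simp [List.map_map, Function.comp]
    rw [this, ih]

theorem filter_pvProdBits_map_pvOnes {α : Type} :
    ∀ (ls : List α) (p : Nat), p < ls.length →
      ((pvProdBits ls.length).filter (fun v => v.getD p 2 == 0)).map (pvOnes ls)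
        = pvPow (ls.eraseIdx p) := by
  intro ls
  induction ls with
  | nil => intro p hp; simp at hp
  | cons l ls ih =>
    intro p hp
    simp only [List.length_cons, pvProdBits, List.filter_append, List.filter_map,
      List.map_append, List.map_map]
    cases p with
    | zero =>
      have h0 : (fun v : List Int => v.getD 0 2 == 0) ∘ (fun v => (0 : Int) :: v)
          = fun _ => true := by funext v; simp [List.getD]
      have h1 : (fun v : List Int => v.getD 0 2 == 0) ∘ (fun v => (1 : Int) :: v)
          = fun _ => false := by funext v; simp [List.getD]
      rw [h0, h1]
      simp only [List.filter_true, List.filter_false, List.map_nil, List.append_nil,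
        List.eraseIdx_cons_zero]
      have : (pvOnes (l :: ls)) ∘ (fun v => (0 : Int) :: v) = pvOnes ls := by
        funext v; simp [pvOnes_zero]
      rw [this, map_pvOnes_pvProdBits]
    | succ q =>
      have hq : q < ls.length := by simp at hp; omega
      have h0 : (fun v : List Int => v.getD (q + 1) 2 == 0) ∘ (fun v => (0 : Int) :: v)
          = fun v => v.getD q 2 == 0 := by funext v; simp [List.getD]
      have h1 : (fun v : List Int => v.getD (q + 1) 2 == 0) ∘ (fun v => (1 : Int) :: v)
          = fun v => v.getD q 2 == 0 := by funext v; simp [List.getD]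
      rw [h0, h1]
      have e0 : (pvOnes (l :: ls)) ∘ (fun v => (0 : Int) :: v) = pvOnes ls := by
        funext v; simp [pvOnes_zero]
      have e1 : (pvOnes (l :: ls)) ∘ (fun v => (1 : Int) :: v) = fun v => l :: pvOnes ls v := by
        funext v; simp [pvOnes_one]
      rw [e0, e1, List.eraseIdx_cons_succ, pvPow]
      have : ((pvProdBits ls.length).filter (fun v => v.getD q 2 == 0)).map
            (fun v => l :: pvOnes ls v)
          = (((pvProdBits ls.length).filter (fun v => v.getD q 2 == 0)).map
              (pvOnes ls)).map (fun s => l :: s) := by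
        simp [List.map_map, Function.comp]
      rw [this, ih q hq]

-- A's inner enumerate-loop extracts exactly the 1-bit labels
theorem enum_filter_ones {α : Type} (c : Int → α) :
    ∀ (v : List Int) (s : Int),
      (((PySem.List.enumerate v s).filter (fun p => p.2 == 1)).map (fun p => c p.1))
        = pvOnes ((PySem.List.pyRange s (s + v.length) 1).map c) v := by
  intro v
  induction v with
  | nil => intro s; simp [PySem.List.enumerate, PySem.List.pyRange_one_eq_nil, pvOnes]
  | cons b v ih =>
    intro s
    have hcons : PySem.List.pyRange s (s + ((b :: v).length : Int)) 1
        = s :: PySem.List.pyRange (s + 1) (s + ((b :: v).length : Int)) 1 :=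
      PySem.List.pyRange_one_cons (by simp)
    have harg : s + ((b :: v).length : Int) = (s + 1) + (v.length : Int) := by
      push_cast [List.length_cons]; ring
    rw [PySem.List.enumerate_cons, hcons, harg, List.map_cons]
    by_cases hb : b = 1
    · subst hb
      rw [List.filter_cons_of_pos (by simp), List.map_cons, pvOnes_one, ih (s + 1)]
    · rw [List.filter_cons_of_neg (by simpa using hb), ih (s + 1)]
      simp [pvOnes, hb]

-- B's doubling loop over the reversed cell list builds pvPow of the labels
theorem foldl_reverse_pvPow {α : Type} (c : Int → α) :
    ∀ (L : List Int),
      L.reverse.foldl (fun S i => S ++ S.map (fun s => c i :: s)) [([] : List α)]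
        = pvPow (L.map c) := by
  intro L
  induction L with
  | nil => simp [pvPow]
  | cons a L ih =>
    rw [List.reverse_cons, List.foldl_append]
    simp only [List.foldl_cons, List.foldl_nil, ih, List.map_cons, pvPow]

theorem eraseIdx_map {α β : Type} (f : α → β) :
    ∀ (L : List α) (p : Nat), (L.eraseIdx p).map f = (L.map f).eraseIdx p := by
  intro L
  induction L with
  | nil => intro p; simp
  | cons a L ih =>
    intro p
    cases p with
    | zero => simp
    | succ q => simp [List.eraseIdx_cons_succ, ih q]

-- ===== VERDICT (by name: the statement is the Claim_ definition above) =====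
theorem get_possible_dirty_cells_spec : Claim_equal_get_possible_dirty_cells := by
  intro grid_size base_pos _ hpre
  obtain ⟨hlen, hin⟩ := hpre
  unfold Spec_get_possible_dirty_cells
  unfold get_possible_dirty_cells get_possible_dirty_cells_alt
  simp only []
  set w := grid_size.1 with hw
  set n := w * grid_size.2 with hn
  set N := n.toNat with hN
  -- the two ports compute the same raw base index
  have hget0 : (PySem.List.pyGet? base_pos 0).getD 0 = base_pos.getD 0 0 := by
    cases base_pos with
    | nil => simp at hlen
    | cons x xs => simp [PySem.List.pyGet?, PySem.List.pyIdx?, List.getD]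
  have hget1 : (PySem.List.pyGet? base_pos 1).getD 0 = base_pos.getD 1 0 := by
    cases base_pos with
    | nil => simp at hlen
    | cons x xs =>
      cases xs with
      | nil => simp at hlen
      | cons y ys =>
        simp [PySem.List.pyGet?, PySem.List.pyIdx?, List.getD]
  rw [hget0, hget1]
  set bi := base_pos.getD 0 0 + base_pos.getD 1 0 * w with hbi
  -- the resolved (wrapped) index
  obtain ⟨hlo, hhi⟩ := hin
  have hNpos : 0 < N := by omega
  obtain ⟨p, hpN, hidx⟩ : ∃ p, p < N ∧ PySem.List.pyIdx? N bi = some p := by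
    unfold PySem.List.pyIdx?
    by_cases h : 0 ≤ bi
    · exact ⟨bi.toNat, by omega, by rw [if_pos h, if_pos (by omega)]⟩
    · exact ⟨N - (-bi).toNat, by omega, by rw [if_neg h, if_pos (by omega)]⟩
  -- B side: pop? removes exactly index p of the range of cells
  have hrange_len : (PySem.List.pyRange 0 n 1).length = N := by
    simp [PySem.List.length_pyRange_one]; omega
  have hcond' : (p : Int) < n := by omega
  have hpop : PySem.List.pop? (PySem.List.pyRange 0 n 1) bi
      = some (0 + (p : Int), (PySem.List.pyRange 0 n 1).eraseIdx p) := by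
    unfold PySem.List.pop?
    rw [hrange_len, hidx]
    simp [PySem.List.getElem?_pyRange_one, hcond']
  rw [hpop]
  simp only [foldl_reverse_pvPow (fun i => [PySem.Int.mod i w, PySem.Int.floordiv i w]),
    eraseIdx_map]
  -- A side: indexing a length-N vector by bi resolves to plain getD p
  have hfilter : (pvProdBits N).filter (fun v => (PySem.List.pyGet? v bi).getD 2 == 0)
      = (pvProdBits N).filter (fun v => v.getD p 2 == 0) := by
    apply List.filter_congr
    intro v hv
    have hvlen : v.length = N := length_of_mem_pvProdBits N v hv
    have : PySem.List.pyGet? v bi = v[p]? := by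
      unfold PySem.List.pyGet?
      rw [hvlen, hidx]; rfl
    rw [this, List.getElem?_eq_getElem (by omega : p < v.length)]
    simp [List.getD, List.getElem?_eq_getElem (by omega : p < v.length)]
  rw [hfilter]
  -- the inner enumerate loop is pvOnes over the coordinate labels
  set ls : List (List Int) :=
    (PySem.List.pyRange 0 n 1).map (fun i => [PySem.Int.mod i w, PySem.Int.floordiv i w]) with hls
  have hlsn : ls.length = N := by
    simp [hls, PySem.List.length_pyRange_one]; omega
  have hinner : ((pvProdBits N).filter (fun v => v.getD p 2 == 0)).map
      (fun possible => (PySem.List.enumerate possible).foldl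
        (fun l q =>
          if q.2 == 1 then l ++ [[PySem.Int.mod q.1 w, PySem.Int.floordiv q.1 w]] else l) [])
      = ((pvProdBits N).filter (fun v => v.getD p 2 == 0)).map (pvOnes ls) := by
    apply List.map_congr_left
    intro v hv
    have hvlen : v.length = N := length_of_mem_pvProdBits N v (List.mem_of_mem_filter hv)
    rw [PySem.List.foldl_append_if (fun q : Int × Int => q.2 == 1)
      (fun q => [PySem.Int.mod q.1 w, PySem.Int.floordiv q.1 w]) _ []]
    simp only [List.nil_append]
    rw [show (fun q : Int × Int => [PySem.Int.mod q.1 w, PySem.Int.floordiv q.1 w])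
        = fun q : Int × Int => (fun i => [PySem.Int.mod i w, PySem.Int.floordiv i w]) q.1 from rfl]
    rw [enum_filter_ones (fun i => [PySem.Int.mod i w, PySem.Int.floordiv i w]) v 0, hls, hvlen]
    have h0N : (0 : Int) + (N : Int) = n := by omega
    rw [h0N]
  rw [hinner, ← hlsn, filter_pvProdBits_map_pvOnes ls p (by omega)]
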